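-- pv_equiv track=rewrite | github.com/AyushShahi01/Mahalaxmi-tours-and-travels | Backend/system/url_utils.py | fix_esewa_callback_url
-- ===== SOURCE A (Python) =====
-- def fix_esewa_callback_url(url):
--     """
--     Fix malformed eSewa callback URLs where 'data' parameter comes after a second '?'
--
--     eSewa sometimes constructs callback URLs incorrectly by appending the 'data'
--     parameter with '?' instead of '&', breaking query string parsing:
--
--     WRONG:  /verify-and-book/?param1=val1&param2=val2?data=BASE64
--     CORRECT: /verify-and-book/?param1=val1&param2=val2&data=BASE64
--
--     Args:
--         url (str): Full URL string that may contain a second '?' in query string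
--
--     Returns:
--         str: Fixed URL with second '?' replaced by '&'
--
--     Examples:
--         >>> url = 'http://localhost:8000/api/system/esewa/verify-and-book/?booking_reference=BK123&package_id=8?data=BASE64'
--         >>> fix_esewa_callback_url(url)
--         'http://localhost:8000/api/system/esewa/verify-and-book/?booking_reference=BK123&package_id=8&data=BASE64'
--
--         >>> url = 'http://localhost:8000/api/system/esewa/verify-and-book/?param=value'
--         >>> fix_esewa_callback_url(url)
--         'http://localhost:8000/api/system/esewa/verify-and-book/?param=value'
--
--     Notes:
--         - Only replaces the SECOND '?' (first one after initial query start)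
--         - If URL has only one '?', returns unchanged
--         - Safe to call on already-correct URLs
--         - Works with full URLs or just query strings
--     """
--     if not url or not isinstance(url, str):
--         return url
--
--     # Count question marks in the URL
--     question_mark_count = url.count('?')
--
--     # If 0 or 1 question marks, URL is fine
--     if question_mark_count <= 1:
--         return url
--
--     # Find the position of the first '?'
--     first_q_pos = url.find('?')
--
--     # Find the position of the second '?' (search after the first one)
--     second_q_pos = url.find('?', first_q_pos + 1)
--
--     if second_q_pos == -1:
--         # Should not happen if count > 1, but safety check
--         return url
--
--     # Replace the second '?' with '&'
--     fixed_url = url[:second_q_pos] + '&' + url[second_q_pos + 1:]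
--
--     # If there are more than 2 question marks, recursively fix them
--     if question_mark_count > 2:
--         return fix_esewa_callback_url(fixed_url)
--
--     return fixed_url
-- ===== SOURCE B (Python) =====
-- def fix_esewa_callback_url(url):
--     if not url or not isinstance(url, str):
--         return url
--     out = []
--     first_seen = False
--     for ch in url:
--         if ch == '?':
--             if first_seen:
--                 out.append('&')
--             else:
--                 out.append('?')
--                 first_seen = True
--         else:
--             out.append(ch)
--     return ''.join(out)
-- ===== Notes on version B (the rewrite author's own statement) =====
-- stated objective: alternative
-- what changed: Replaced A's recursive find/slice/concatenate rescanning (one rebuild per extra question mark) with a single forward pass over the characters keeping a first-question-mark-seen flag and emitting an ampersand for every later question mark.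
import Mathlib
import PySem

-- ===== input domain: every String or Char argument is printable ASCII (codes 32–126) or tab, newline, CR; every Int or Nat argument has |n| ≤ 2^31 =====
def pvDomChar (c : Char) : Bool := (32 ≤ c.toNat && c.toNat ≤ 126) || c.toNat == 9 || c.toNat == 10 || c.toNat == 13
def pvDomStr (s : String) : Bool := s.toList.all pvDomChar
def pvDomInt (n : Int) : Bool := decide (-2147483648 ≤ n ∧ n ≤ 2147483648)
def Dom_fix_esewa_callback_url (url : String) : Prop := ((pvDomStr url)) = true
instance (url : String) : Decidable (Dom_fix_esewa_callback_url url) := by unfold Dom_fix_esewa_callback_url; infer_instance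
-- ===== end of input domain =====

-- B replaces A's recursive find/slice rescanning by one linear pass with a first-question-mark-seen flag (objective: alternative).

-- ===== PORT A =====
-- helper lemmas needed by port A's termination proof (cited by decreasing_by)

-- PySem.Chars.count of a single-character needle equals List.count of that character
theorem pv_count_go_singleton (c : Char) (l : List Char) (fuel acc : Nat) (h : l.length ≤ fuel) :
    PySem.Chars.count.go [c] fuel l acc = acc + l.count c := by
  induction l generalizing fuel acc with
  | nil => cases fuel <;> simp [PySem.Chars.count.go]
  | cons x t ih =>
    cases fuel with
    | zero => simp at h
    | succ f =>
      rw [PySem.Chars.count.go]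
      by_cases hx : x = c
      · subst hx
        simp only [List.isPrefixOf, Bool.and_true, beq_self_eq_true, if_pos,
          List.length_singleton, List.drop_one, List.tail_cons]
        rw [ih _ _ (by simpa using h)]
        simp
        omega
      · simp only [List.isPrefixOf, Bool.and_true, beq_iff_eq]
        rw [if_neg (by simp [Ne.symm hx]), ih _ _ (by simpa using h)]
        simp [hx]

theorem pv_count_singleton (cs : List Char) (c : Char) :
    PySem.Chars.count cs [c] = cs.count c := by
  simp [PySem.Chars.count, pv_count_go_singleton c cs cs.length 0 le_rfl]

theorem pv_prefix_q_iff (l : List Char) : ['?'] <+: l ↔ l.head? = some '?' := by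
  constructor
  · rintro ⟨r, rfl⟩; rfl
  · intro h
    cases l with
    | nil => simp at h
    | cons x r => simp at h; exact ⟨r, by simp [h]⟩

theorem pv_find_split (a t : List Char) (ha : a.count '?' = 0) :
    PySem.Chars.find (a ++ '?' :: t) ['?'] = (a.length : Int) := by
  have hinf : ['?'] <:+: (a ++ '?' :: t) := ⟨a, t, by simp⟩
  have h0 : 0 ≤ PySem.Chars.find (a ++ '?' :: t) ['?'] :=
    (PySem.Chars.find_nonneg_iff _ _).mpr hinf
  obtain ⟨hpre, hmin⟩ := PySem.Chars.find_spec h0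
  set n := (PySem.Chars.find (a ++ '?' :: t) ['?']).toNat with hn
  have hnle : n ≤ a.length := by
    by_contra hlt
    exact hmin a.length (by omega)
      ((pv_prefix_q_iff _).mpr (by rw [List.head?_drop, List.getElem?_append_right le_rfl]; simp))
  have hne : ¬ n < a.length := by
    intro hlt
    have := (pv_prefix_q_iff _).mp hpre
    rw [List.head?_drop, List.getElem?_append_left hlt, List.getElem?_eq_getElem hlt] at this
    have heq : a[n] = '?' := Option.some.inj this
    have hmem : '?' ∈ a := heq ▸ List.getElem_mem hlt
    simp [← List.count_pos_iff] at hmem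
    omega
  have : n = a.length := by omega
  omega

theorem pv_exists_split (c : Char) (l : List Char) (h : 1 ≤ l.count c) :
    ∃ a t, l = a ++ c :: t ∧ a.count c = 0 := by
  induction l with
  | nil => simp at h
  | cons x r ih =>
    by_cases hx : x = c
    · exact ⟨[], r, by simp [hx], by simp⟩
    · obtain ⟨a, t, hr, hc⟩ := ih (by simpa [List.count_cons, hx] using h)
      exact ⟨x :: a, t, by simp [hr], by simp [List.count_cons, hx, hc]⟩

-- the master decomposition of one step of A: positions, slices, and the split of the input
theorem pv_key (url : String) (h : 2 ≤ url.toList.count '?') :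
    ∃ a b c2 : List Char,
      url.toList = a ++ '?' :: (b ++ '?' :: c2) ∧ a.count '?' = 0 ∧ b.count '?' = 0 ∧
      PySem.Str.find url "?" = (a.length : Int) ∧
      PySem.Str.findFrom url "?" ((a.length : Int) + 1) =
        ((a.length + 1 + b.length : Nat) : Int) ∧
      (PySem.Str.slice url none (some ((a.length + 1 + b.length : Nat) : Int))).toList
        = a ++ '?' :: b ∧
      (PySem.Str.slice url (some (((a.length + 1 + b.length : Nat) : Int) + 1)) none).toList
        = c2 := by
  obtain ⟨a, t, hsplit, hca⟩ := pv_exists_split '?' url.toList (by omega)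
  have ht : 1 ≤ t.count '?' := by
    rw [hsplit] at h; simp [List.count_append, List.count_cons] at h; omega
  obtain ⟨b, c2, hsplit2, hcb⟩ := pv_exists_split '?' t ht
  subst hsplit2
  refine ⟨a, b, c2, hsplit, hca, hcb, ?_, ?_, ?_, ?_⟩
  · simpa [hsplit] using pv_find_split a (b ++ '?' :: c2) hca
  · have hk : a.length + 1 ≤ url.toList.length := by rw [hsplit]; simp
    have hcast : ((a.length : Int) + 1) = ((a.length + 1 : Nat) : Int) := by push_cast; ring
    rw [PySem.Str.findFrom_eq, hcast, PySem.Chars.findFrom_natCast _ _ _ hk, hsplit]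
    have hdrop : (a ++ '?' :: (b ++ '?' :: c2)).drop (a.length + 1) = b ++ '?' :: c2 := by
      rw [show a ++ '?' :: (b ++ '?' :: c2) = (a ++ ['?']) ++ (b ++ '?' :: c2) by simp,
        List.drop_left' (by simp)]
    rw [hdrop, show ("?" : String).toList = ['?'] from rfl, pv_find_split b c2 hcb]
    rw [if_neg (by omega)]
    push_cast; ring
  · rw [PySem.Str.toList_slice, PySem.Chars.slice_eq_listSlice, PySem.List.slice_to_natCast,
      hsplit,
      show a ++ '?' :: (b ++ '?' :: c2) = (a ++ '?' :: b) ++ ('?' :: c2) by simp,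
      List.take_left' (by simp; omega)]
  · have hcast : (((a.length + 1 + b.length : Nat) : Int) + 1)
        = ((a.length + 1 + b.length + 1 : Nat) : Int) := by push_cast; ring
    rw [PySem.Str.toList_slice, PySem.Chars.slice_eq_listSlice, hcast,
      PySem.List.slice_from_natCast, hsplit,
      show a ++ '?' :: (b ++ '?' :: c2) = ((a ++ '?' :: b) ++ ['?']) ++ c2 by simp,
      List.drop_left' (by simp; omega)]

-- termination: the fixed URL has one '?' fewer
theorem pv_step_count (url : String)
    (h1 : ¬ PySem.Str.count url "?" ≤ 1) :
    (String.ofList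
        ((PySem.Str.slice url none
            (some (PySem.Str.findFrom url "?" (PySem.Str.find url "?" + 1)))).toList ++
          '&' ::
            (PySem.Str.slice url
                (some (PySem.Str.findFrom url "?" (PySem.Str.find url "?" + 1) + 1))
                none).toList)).toList.count '?'
      < url.toList.count '?' := by
  have hc : PySem.Str.count url "?" = url.toList.count '?' := by
    rw [PySem.Str.count_eq]; exact pv_count_singleton _ _
  have h2 : 2 ≤ url.toList.count '?' := by omega
  obtain ⟨a, b, c2, hsplit, hca, hcb, hfind, hfindFrom, hs1, hs2⟩ := pv_key url h2
  rw [hfind, hfindFrom, hs1, hs2, String.toList_ofList]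
  rw [hsplit]
  simp [List.count_append, List.count_cons, hca, hcb]

def fix_esewa_callback_url (url : String) : String :=
  if url = "" then url
  else
    let question_mark_count := PySem.Str.count url "?"
    if question_mark_count ≤ 1 then url
    else
      let first_q_pos := PySem.Str.find url "?"
      let second_q_pos := PySem.Str.findFrom url "?" (first_q_pos + 1)
      if second_q_pos = -1 then url
      else
        -- url[:second] + '&' + url[second+1:]  (string concatenation written on the char lists)
        let fixed_url := String.ofList
          ((PySem.Str.slice url none (some second_q_pos)).toList ++
            '&' :: (PySem.Str.slice url (some (second_q_pos + 1)) none).toList)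
        if question_mark_count > 2 then fix_esewa_callback_url fixed_url
        else fixed_url
termination_by url.toList.count '?'
decreasing_by
  exact pv_step_count url (by assumption)

-- ===== PORT B =====
def fix_esewa_callback_url_alt (url : String) : String :=
  if url = "" then url
  else
    let res := url.toList.foldl
      (fun (st : List Char × Bool) ch =>
        if ch = '?' then
          if st.2 then (st.1 ++ ['&'], st.2) else (st.1 ++ ['?'], true)
        else (st.1 ++ [ch], st.2))
      ([], false)
    String.ofList res.1   -- ''.join of the collected single characters

-- ===== PRECONDITION & SPEC =====
def Spec_fix_esewa_callback_url (url : String) (out : String) : Prop := out = fix_esewa_callback_url_alt url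
instance (url : String) (out : String) : Decidable (Spec_fix_esewa_callback_url url out) := by unfold Spec_fix_esewa_callback_url; infer_instance

-- ===== CLAIM (what is proved, stated in full; the proofs are below) =====
def Claim_equal_fix_esewa_callback_url : Prop := ∀ (url : String), Dom_fix_esewa_callback_url url → Spec_fix_esewa_callback_url url (fix_esewa_callback_url url)

-- ===== LEMMAS AND PROOFS =====

-- structural reference for B's loop
def pvGoQ : Bool → List Char → List Char
  | _, [] => []
  | seen, c :: r => if c = '?' then (if seen then '&' else '?') :: pvGoQ true r else c :: pvGoQ seen r

theorem pv_foldl_eq_goQ (l : List Char) (acc : List Char) (seen : Bool) :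
    l.foldl
      (fun (st : List Char × Bool) ch =>
        if ch = '?' then
          if st.2 then (st.1 ++ ['&'], st.2) else (st.1 ++ ['?'], true)
        else (st.1 ++ [ch], st.2))
      (acc, seen)
      = (acc ++ pvGoQ seen l, seen || l.any (· = '?')) := by
  induction l generalizing acc seen with
  | nil => simp [pvGoQ]
  | cons c r ih =>
    by_cases hc : c = '?'
    · subst hc
      cases seen <;> simp [pvGoQ, List.foldl_cons, ih]
    · simp [pvGoQ, List.foldl_cons, hc, ih]

theorem pv_goQ_no_q (seen : Bool) (l : List Char) (h : l.count '?' = 0) :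
    pvGoQ seen l = l := by
  induction l generalizing seen with
  | nil => rfl
  | cons c r ih =>
    have hc : ¬ c = '?' := by
      intro hc; subst hc; simp [List.count_cons] at h
    simp [pvGoQ, hc, ih seen (by simpa [List.count_cons, hc] using h)]

theorem pv_goQ_le_one (l : List Char) (h : l.count '?' ≤ 1) :
    pvGoQ false l = l := by
  induction l with
  | nil => rfl
  | cons c r ih =>
    by_cases hc : c = '?'
    · subst hc
      have hr : r.count '?' = 0 := by simp [List.count_cons] at h; omega
      simp [pvGoQ, pv_goQ_no_q true r hr]
    · simp [pvGoQ, hc, ih (by simpa [List.count_cons, hc] using h)]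

theorem pv_goQ_append_no_q (seen : Bool) (a r : List Char) (ha : a.count '?' = 0) :
    pvGoQ seen (a ++ r) = a ++ pvGoQ seen r := by
  induction a with
  | nil => rfl
  | cons c t ih =>
    have hc : ¬ c = '?' := by
      intro hc; subst hc; simp [List.count_cons] at ha
    simp [pvGoQ, hc, ih (by simpa [List.count_cons, hc] using ha)]

-- B as a function of the char list
theorem pv_alt_eq (url : String) (h : url ≠ "") :
    fix_esewa_callback_url_alt url = String.ofList (pvGoQ false url.toList) := by
  rw [fix_esewa_callback_url_alt, if_neg h]
  simp [pv_foldl_eq_goQ]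

theorem pv_main (n : Nat) : ∀ url : String, url.toList.count '?' ≤ n →
    fix_esewa_callback_url url = fix_esewa_callback_url_alt url := by
  induction n with
  | zero =>
    intro url hn
    rw [fix_esewa_callback_url]
    by_cases h0 : url = ""
    · rw [if_pos h0, fix_esewa_callback_url_alt, if_pos h0]
    · rw [if_neg h0]
      simp only []
      have hc : PySem.Str.count url "?" = url.toList.count '?' := by
        rw [PySem.Str.count_eq]; exact pv_count_singleton _ _
      rw [if_pos (by omega), pv_alt_eq url h0,
        pv_goQ_le_one url.toList (by omega), String.ofList_toList]
  | succ m ih =>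
    intro url hn
    rw [fix_esewa_callback_url]
    by_cases h0 : url = ""
    · rw [if_pos h0, fix_esewa_callback_url_alt, if_pos h0]
    · rw [if_neg h0]
      simp only []
      have hc : PySem.Str.count url "?" = url.toList.count '?' := by
        rw [PySem.Str.count_eq]; exact pv_count_singleton _ _
      by_cases h1 : PySem.Str.count url "?" ≤ 1
      · rw [if_pos h1, pv_alt_eq url h0,
          pv_goQ_le_one url.toList (by omega), String.ofList_toList]
      · rw [if_neg h1]
        obtain ⟨a, b, c2, hsplit, hca, hcb, hfind, hfindFrom, hs1, hs2⟩ :=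
          pv_key url (by omega)
        rw [hfind, hfindFrom, if_neg (by omega), hs1, hs2]
        have hcount : url.toList.count '?' = 2 + c2.count '?' := by
          rw [hsplit]; simp [List.count_append, List.count_cons, hca, hcb]; omega
        -- the fixed URL and its char list
        set fixed := String.ofList ((a ++ '?' :: b) ++ '&' :: c2) with hfixed
        have hfl : fixed.toList = a ++ '?' :: (b ++ '&' :: c2) := by
          rw [hfixed, String.toList_ofList]; simp
        have hfne : fixed ≠ "" := by
          intro he
          have := hfl
          rw [he] at this
          simp at this
        -- B's value on the fixed URL equals B's value on url
        have haltfix : fix_esewa_callback_url_alt fixed = fix_esewa_callback_url_alt url := by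
          rw [pv_alt_eq fixed hfne, pv_alt_eq url h0, hfl, hsplit]
          rw [pv_goQ_append_no_q false a _ hca, pv_goQ_append_no_q false a _ hca]
          simp only [pvGoQ, if_pos rfl]
          rw [pv_goQ_append_no_q true b _ hcb, pv_goQ_append_no_q true b _ hcb]
          simp [pvGoQ]
        by_cases h3 : PySem.Str.count url "?" > 2
        · rw [if_pos h3]
          rw [ih fixed (by rw [hfl]; simp [List.count_append, List.count_cons, hca, hcb]; omega)]
          exact haltfix
        · rw [if_neg h3]
          have hc2 : c2.count '?' = 0 := by omega
          rw [← haltfix, pv_alt_eq fixed hfne, hfl,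
            pv_goQ_append_no_q false a _ hca]
          simp only [pvGoQ, if_pos rfl]
          rw [pv_goQ_append_no_q true b _ hcb, pv_goQ_no_q true ('&' :: c2) (by simp [List.count_cons, hc2])]
          rw [hfixed]; exact congrArg String.ofList (by simp)

-- ===== VERDICT (by name: the statement is the Claim_ definition above) =====
theorem fix_esewa_callback_url_spec : Claim_equal_fix_esewa_callback_url := by
  intro url _
  unfold Spec_fix_esewa_callback_url
  exact pv_main (url.toList.count '?') url le_rfl
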